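-- pv_equiv track=rewrite | github.com/BuyMeAnIcecream/chapter-a-day | scripts/nkjv-editor.py | fix_line_breaks
-- ===== SOURCE A (Python) =====
-- def fix_line_breaks(content: str) -> str:
--     """
--     Join lines that were broken by PDF copy. Keeps:
--     - New verses (next line starts with digits) as separate lines.
--     - Paragraph breaks (blank lines) as-is.
--     Joins when the current line doesn't end with . ? ! : and the next
--     line is a continuation (doesn't start with a verse number).
--     """
--     lines = content.split("\n")
--     result_lines = []
--     buffer = None
--
--     def should_join(prev: str, next_line: str) -> bool:
--         if not next_line.strip():
--             return False
--         if prev.rstrip().endswith((".", "?", "!", ":")):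
--             return False
--         stripped = next_line.lstrip()
--         if not stripped:
--             return False
--         if stripped[0].isdigit():
--             return False
--         return True
--
--     for line in lines:
--         if line.strip() == "":
--             if buffer is not None:
--                 result_lines.append(buffer)
--                 result_lines.append("")
--                 buffer = None
--         else:
--             if buffer is None:
--                 buffer = line
--             else:
--                 if should_join(buffer, line):
--                     buffer = buffer + " " + line
--                 else:
--                     result_lines.append(buffer)
--                     buffer = line
--     if buffer is not None:
--         result_lines.append(buffer)
--     return "\n".join(result_lines)
-- ===== SOURCE B (Python) =====
-- def fix_line_breaks(content: str) -> str:
--     """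
--     Two-phase re-implementation: first group the lines into maximal runs of
--     blank / non-blank lines, then turn each non-blank run into paragraphs
--     (joining continuation lines) and each blank run into a single separator.
--     """
--
--     def should_join(prev: str, next_line: str) -> bool:
--         if not next_line.strip():
--             return False
--         if prev.rstrip().endswith((".", "?", "!", ":")):
--             return False
--         stripped = next_line.lstrip()
--         if not stripped:
--             return False
--         if stripped[0].isdigit():
--             return False
--         return True
--
--     # Phase 1: group lines into maximal runs keyed by blankness.
--     runs = []  # list of (is_blank, [lines])
--     current = None
--     for line in content.split("\n"):
--         blank = line.strip() == ""
--         if current is not None and current[0] == blank: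
--             current[1].append(line)
--         else:
--             if current is not None:
--                 runs.append(current)
--             current = (blank, [line])
--     if current is not None:
--         runs.append(current)
--
--     # Phase 2: fold the runs into output lines.
--     result = []
--     for blank, run in runs:
--         if blank:
--             if result:
--                 result.append("")
--         else:
--             paras = []
--             cur = run[0]
--             for line in run[1:]:
--                 if should_join(cur, line):
--                     cur = cur + " " + line
--                 else:
--                     paras.append(cur)
--                     cur = line
--             paras.append(cur)
--             result.extend(paras)
--     return "\n".join(result)
-- ===== Notes on version B (the rewrite author's own statement) =====
-- stated objective: alternative
-- what changed: A's single pass with a pending-paragraph buffer is replaced by a two-phase decomposition: group the lines into maximal blank/non-blank runs first, then fold each non-blank run into paragraphs and each blank run into a single separator line.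
import Mathlib
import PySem

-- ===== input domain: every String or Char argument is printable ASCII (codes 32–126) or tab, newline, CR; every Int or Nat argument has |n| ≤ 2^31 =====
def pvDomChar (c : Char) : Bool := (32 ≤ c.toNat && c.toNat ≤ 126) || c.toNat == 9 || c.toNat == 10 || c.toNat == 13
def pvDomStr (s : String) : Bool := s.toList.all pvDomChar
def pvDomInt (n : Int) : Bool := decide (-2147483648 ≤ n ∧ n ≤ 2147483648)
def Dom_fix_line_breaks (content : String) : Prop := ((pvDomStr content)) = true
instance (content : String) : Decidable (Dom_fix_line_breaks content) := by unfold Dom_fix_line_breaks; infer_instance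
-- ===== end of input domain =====

-- B replaces A's single buffered pass by a two-phase decomposition (group lines into
-- maximal blank/non-blank runs, then fold each run); objective: alternative structure, same cost.


-- ===== PORT A =====
def shouldJoin (prev next_line : String) : Bool :=
  if PySem.Str.strip next_line == "" then false
  else if PySem.Str.endswith (PySem.Str.rstrip prev) "." ||
          PySem.Str.endswith (PySem.Str.rstrip prev) "?" ||
          PySem.Str.endswith (PySem.Str.rstrip prev) "!" ||
          PySem.Str.endswith (PySem.Str.rstrip prev) ":" then false
  else
    let stripped := PySem.Str.lstrip next_line
    if stripped == "" then false
    else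
      match PySem.Str.pyGet? stripped 0 with
      | some c => if PySem.Chars.isdigit c then false else true
      | none => false  -- unreachable: stripped is non-empty

def stepA (st : List String × Option String) (line : String) : List String × Option String :=
  if PySem.Str.strip line == "" then
    match st.2 with
    | some b => (st.1 ++ [b, ""], none)
    | none => st
  else
    match st.2 with
    | none => (st.1, some line)
    | some b =>
        if shouldJoin b line then (st.1, some (b ++ " " ++ line))
        else (st.1 ++ [b], some line)

def fix_line_breaks (content : String) : String :=
  let lines := ((PySem.Str.split? content "\n").getD [])
  let st := lines.foldl stepA ([], none)
  let result_lines := match st.2 with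
    | some b => st.1 ++ [b]
    | none => st.1
  PySem.Str.join "\n" result_lines

-- ===== PORT B =====
-- Phase 1: group lines into maximal runs keyed by blankness.
def groupStep (st : List (Bool × List String) × Option (Bool × List String)) (line : String) :
    List (Bool × List String) × Option (Bool × List String) :=
  let blank := PySem.Str.strip line == ""
  match st.2 with
  | some c =>
      if c.1 == blank then (st.1, some (c.1, c.2 ++ [line]))
      else (st.1 ++ [c], some (blank, [line]))
  | none => (st.1, some (blank, [line]))

def groupRuns (lines : List String) : List (Bool × List String) :=
  let st := lines.foldl groupStep ([], none)
  match st.2 with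
  | some c => st.1 ++ [c]
  | none => st.1

-- Phase 2 inner loop: one non-blank run → paragraphs.
def paraStep (st : List String × String) (line : String) : List String × String :=
  if shouldJoin st.2 line then (st.1, st.2 ++ " " ++ line)
  else (st.1 ++ [st.2], line)

def parasOf (run : List String) : List String :=
  match run with
  | [] => []  -- unreachable (runs are non-empty); totality guard only
  | f :: rest =>
      let st := rest.foldl paraStep ([], f)
      st.1 ++ [st.2]

def runStep (res : List String) (r : Bool × List String) : List String :=
  if r.1 then (if res = [] then res else res ++ [""])
  else res ++ parasOf r.2

def fix_line_breaks_alt (content : String) : String :=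
  let lines := ((PySem.Str.split? content "\n").getD [])
  let result := (groupRuns lines).foldl runStep []
  PySem.Str.join "\n" result

-- ===== PRECONDITION & SPEC =====
def Spec_fix_line_breaks (content : String) (out : String) : Prop := out = fix_line_breaks_alt content
instance (content : String) (out : String) : Decidable (Spec_fix_line_breaks content out) := by unfold Spec_fix_line_breaks; infer_instance

-- ===== CLAIM (what is proved, stated in full; the proofs are below) =====
def Claim_equal_fix_line_breaks : Prop := ∀ (content : String), Dom_fix_line_breaks content → Spec_fix_line_breaks content (fix_line_breaks content)

-- ===== LEMMAS AND PROOFS =====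

-- simulation invariant between A's single-pass state and B's phase-1 grouping state
def StInv (resA : List String) (buf : Option String)
    (runsG : List (Bool × List String)) (cur : Option (Bool × List String)) : Prop :=
  match cur with
  | none => runsG = [] ∧ resA = [] ∧ buf = none
  | some (true, _) => buf = none ∧ resA = runStep (runsG.foldl runStep []) (true, [])
  | some (false, r) => ∃ f rest, r = f :: rest ∧
      buf = some (rest.foldl paraStep ([], f)).2 ∧
      resA = runsG.foldl runStep [] ++ (rest.foldl paraStep ([], f)).1

theorem inv_step (resA : List String) (buf : Option String)
    (runsG : List (Bool × List String)) (cur : Option (Bool × List String)) (line : String)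
    (h : StInv resA buf runsG cur) :
    StInv (stepA (resA, buf) line).1 (stepA (resA, buf) line).2
      (groupStep (runsG, cur) line).1 (groupStep (runsG, cur) line).2 := by
  by_cases hb : PySem.Str.strip line == ""
  · match cur with
    | none =>
        obtain ⟨h1, h2, h3⟩ := h
        subst h1 h2 h3
        simp [StInv, stepA, groupStep, hb, runStep]
    | some (true, r) =>
        obtain ⟨h1, h2⟩ := h
        subst h1
        simp [StInv, stepA, groupStep, hb, h2]
    | some (false, r) =>
        obtain ⟨f, rest, hr, h1, h2⟩ := h
        subst h1 h2
        simp [StInv, stepA, groupStep, hb, hr, List.foldl_append, runStep, parasOf]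
  · match cur with
    | none =>
        obtain ⟨h1, h2, h3⟩ := h
        subst h1 h2 h3
        simp only [stepA, groupStep, hb]
        simp [StInv]
    | some (true, r) =>
        obtain ⟨h1, h2⟩ := h
        subst h1
        simp only [stepA, groupStep, hb]
        simp only [StInv]
        refine ⟨line, [], by simp, by simp, ?_⟩
        simp [h2, List.foldl_append, runStep]
    | some (false, r) =>
        obtain ⟨f, rest, hr, h1, h2⟩ := h
        subst h1 h2
        simp only [stepA, groupStep, hb]
        simp only [StInv]
        by_cases hj : shouldJoin (rest.foldl paraStep ([], f)).2 line
        · refine ⟨f, rest ++ [line], by simp [hr], ?_, ?_⟩ <;>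
            simp [hj, paraStep]
        · refine ⟨f, rest ++ [line], by simp [hr], ?_, ?_⟩ <;>
            simp [hj, paraStep]

theorem inv_fold (lines : List String) (resA : List String) (buf : Option String)
    (runsG : List (Bool × List String)) (cur : Option (Bool × List String))
    (h : StInv resA buf runsG cur) :
    StInv (lines.foldl stepA (resA, buf)).1 (lines.foldl stepA (resA, buf)).2
      (lines.foldl groupStep (runsG, cur)).1 (lines.foldl groupStep (runsG, cur)).2 := by
  induction lines generalizing resA buf runsG cur with
  | nil => exact h
  | cons l ls ih =>
      have := ih _ _ _ _ (inv_step resA buf runsG cur l h)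
      simpa using this

-- the final flush of each pass produces the same line list
theorem out_eq (resA : List String) (buf : Option String)
    (runsG : List (Bool × List String)) (cur : Option (Bool × List String))
    (h : StInv resA buf runsG cur) :
    (match buf with
      | some b => resA ++ [b]
      | none => resA) =
    (match cur with
      | some c => runsG ++ [c]
      | none => runsG).foldl runStep [] := by
  match cur with
  | none =>
      obtain ⟨h1, h2, h3⟩ := h
      subst h1 h2 h3
      rfl
  | some (true, r) =>
      obtain ⟨h1, h2⟩ := h
      subst h1
      simp [h2, List.foldl_append, runStep]
  | some (false, r) =>
      obtain ⟨f, rest, hr, h1, h2⟩ := h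
      subst h1 h2
      simp [hr, List.foldl_append, runStep, parasOf]

-- ===== VERDICT (by name: the statement is the Claim_ definition above) =====
theorem fix_line_breaks_spec : Claim_equal_fix_line_breaks := by
  intro content _
  unfold Spec_fix_line_breaks fix_line_breaks fix_line_breaks_alt groupRuns
  exact congrArg (PySem.Str.join "\n")
    (out_eq _ _ _ _ (inv_fold ((PySem.Str.split? content "\n").getD []) [] none [] none
      ⟨rfl, rfl, rfl⟩))
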